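-- pv_equiv track=rewrite | github.com/Florencia-97/GoodReadsBot | bot.py | filtrar_descripcion
-- ===== SOURCE A (Python) =====
-- def filtrar_descripcion(descripcion):
-- 	corte = '<br />'
-- 	for i in range(2):
-- 		try:
-- 			pos = descripcion.index(corte)
-- 			comienzo = pos + len(corte)
-- 		except:
-- 			comienzo = 0
-- 		descripcion = descripcion[comienzo:]
-- 	return descripcion
-- ===== SOURCE B (Python) =====
-- def filtrar_descripcion(descripcion):
-- 	return descripcion.split('<br />', 2)[-1]
-- ===== Notes on version B (the rewrite author's own statement) =====
-- stated objective: simpler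
-- what changed: Replaces the two-iteration try/index/slice loop with a single split('<br />', 2) and taking the last segment, which is the text after the first two markers (or the whole string when fewer are present).
import Mathlib
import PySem

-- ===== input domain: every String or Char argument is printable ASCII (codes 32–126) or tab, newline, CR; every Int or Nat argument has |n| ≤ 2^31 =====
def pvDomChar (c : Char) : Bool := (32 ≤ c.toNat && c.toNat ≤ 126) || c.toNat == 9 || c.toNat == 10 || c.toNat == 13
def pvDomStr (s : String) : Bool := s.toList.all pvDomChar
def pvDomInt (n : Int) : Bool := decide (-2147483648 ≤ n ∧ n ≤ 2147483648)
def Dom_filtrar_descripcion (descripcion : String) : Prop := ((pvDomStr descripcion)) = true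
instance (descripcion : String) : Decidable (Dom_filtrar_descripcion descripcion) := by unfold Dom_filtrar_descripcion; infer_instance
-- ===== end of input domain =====

-- B replaces A's two-iteration try/index/slice loop by a single split('<br />', 2)[-1] (simpler; same return value).

-- ===== PORT A =====
-- for i in range(2): try: pos = descripcion.index(corte); comienzo = pos + len(corte)
--                    except: comienzo = 0
--                    descripcion = descripcion[comienzo:]
-- ('index' raising ValueError is encoded by find = -1, which sends comienzo to 0)
def filtrar_descripcion (descripcion : String) : String :=
  let corte := "<br />"
  (PySem.List.pyRange 0 2 1).foldl
    (fun desc _ =>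
      let pos := PySem.Str.find desc corte
      let comienzo : Int := if pos = -1 then 0 else pos + PySem.Str.len corte
      PySem.Str.slice desc (some comienzo) none)
    descripcion

-- ===== PORT B =====
-- return descripcion.split('<br />', 2)[-1]
-- (the separator is nonempty and split never returns an empty list, so the .getD ""
--  defaults that make this total are unreachable)
def filtrar_descripcion_alt (descripcion : String) : String :=
  match PySem.Str.splitMax? descripcion "<br />" 2 with
  | some parts => (PySem.List.pyGet? parts (-1)).getD ""
  | none => ""

-- ===== PRECONDITION & SPEC =====
def Spec_filtrar_descripcion (descripcion : String) (out : String) : Prop := out = filtrar_descripcion_alt descripcion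
instance (descripcion : String) (out : String) : Decidable (Spec_filtrar_descripcion descripcion out) := by unfold Spec_filtrar_descripcion; infer_instance

-- ===== CLAIM (what is proved, stated in full; the proofs are below) =====
def Claim_equal_filtrar_descripcion : Prop := ∀ (descripcion : String), Dom_filtrar_descripcion descripcion → Spec_filtrar_descripcion descripcion (filtrar_descripcion descripcion)

-- ===== LEMMAS AND PROOFS =====

def brCut : List Char := "<br />".toList

theorem find_go_succ (l : List Char) (k : Nat) :
    PySem.Chars.find.go brCut l (k + 1) =
      if PySem.Chars.find.go brCut l k = -1 then -1 else PySem.Chars.find.go brCut l k + 1 := by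
  induction l generalizing k with
  | nil =>
    rw [PySem.Chars.find.go.eq_def, PySem.Chars.find.go.eq_def]
    simp [brCut]
  | cons c rest ih =>
    rw [PySem.Chars.find.go.eq_def, PySem.Chars.find.go.eq_def ]
    by_cases hp : brCut.isPrefixOf (c :: rest)
    · simp [hp]
    · simp [hp]
      exact ih (k + 1)

def lastPiece : Nat → List Char → List Char → List Char
  | 0, l, cur => cur.reverse ++ l
  | _ + 1, [], cur => cur.reverse
  | m + 1, c :: rest, cur =>
    if brCut.isPrefixOf (c :: rest) then lastPiece m (List.drop 6 (c :: rest)) []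
    else lastPiece (m + 1) rest (c :: cur)
termination_by _ l _ => l.length
decreasing_by all_goals (simp; try omega)

theorem brCut_length : brCut.length = 6 := rfl

theorem go_getLast? (fuel : Nat) : ∀ (m : Nat) (l cur : List Char) (acc : List (List Char)),
    l.length < fuel →
    (PySem.Chars.splitOnMax.go brCut fuel m l cur acc).getLast? = some (lastPiece m l cur) := by
  induction fuel with
  | zero => intro m l cur acc h; omega
  | succ fuel ih =>
    intro m l cur acc h
    rw [PySem.Chars.splitOnMax.go.eq_def]
    cases l with
    | nil => cases m <;> simp [lastPiece]
    | cons c rest =>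
      cases m with
      | zero => simp [lastPiece]
      | succ m =>
        simp only [Nat.succ_ne_zero, if_false, Nat.add_sub_cancel, brCut_length]
        by_cases hp : brCut.isPrefixOf (c :: rest) = true
        · rw [if_pos hp, ih _ _ _ _ (by simp at h ⊢; omega), lastPiece, if_pos hp]
        · rw [if_neg hp, ih _ _ _ _ (by simp at h ⊢; omega), lastPiece, if_neg hp]

theorem lastPiece_step (l : List Char) : ∀ (cur : List Char) (m : Nat),
    lastPiece (m + 1) l cur =
      if PySem.Chars.find l brCut = -1 then cur.reverse ++ l
      else lastPiece m (List.drop ((PySem.Chars.find l brCut).toNat + 6) l) [] := by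
  induction l with
  | nil =>
    intro cur m
    rw [lastPiece, PySem.Chars.find, PySem.Chars.find.go.eq_def]
    simp [brCut]
  | cons c rest ih =>
    intro cur m
    have hgo : PySem.Chars.find.go brCut (c :: rest) 0
        = if brCut.isPrefixOf (c :: rest) = true then (0 : Int)
          else PySem.Chars.find.go brCut rest (0 + 1) := by
      rw [PySem.Chars.find.go.eq_def]
      rfl
    rw [lastPiece, PySem.Chars.find, hgo]
    by_cases hp : brCut.isPrefixOf (c :: rest) = true
    · rw [if_pos hp, if_pos hp]
      norm_num
    · rw [if_neg hp, if_neg hp, find_go_succ rest 0,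
          ih (c :: cur) m, show PySem.Chars.find rest brCut = PySem.Chars.find.go brCut rest 0 from rfl]
      by_cases hf : PySem.Chars.find.go brCut rest 0 = -1
      · simp [hf]
      · have h0 : 0 ≤ PySem.Chars.find.go brCut rest 0 := by
          have := PySem.Chars.neg_one_le_find (s := rest) (sub := brCut)
          rw [PySem.Chars.find] at this
          omega
        rw [if_neg hf, if_neg hf, if_neg (show ¬ (PySem.Chars.find.go brCut rest 0 + 1 = -1) by omega)]
        rw [show (PySem.Chars.find.go brCut rest 0 + 1).toNat + 6
              = ((PySem.Chars.find.go brCut rest 0).toNat + 6) + 1 by omega,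
            List.drop_succ_cons]

def aStep (cs : List Char) : List Char :=
  if PySem.Chars.find cs brCut = -1 then cs
  else List.drop ((PySem.Chars.find cs brCut).toNat + 6) cs

theorem stepA_toList (t : String) :
    (PySem.Str.slice t
      (some (if PySem.Str.find t "<br />" = -1 then 0
             else PySem.Str.find t "<br />" + PySem.Str.len "<br />")) none).toList
    = aStep t.toList := by
  rw [PySem.Str.toList_slice, PySem.Chars.slice_eq_listSlice, aStep]
  have hf : PySem.Str.find t "<br />" = PySem.Chars.find t.toList brCut := by
    simp [brCut]
  have hlen : PySem.Str.len "<br />" = 6 := by decide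
  rw [hf, hlen]
  by_cases h : PySem.Chars.find t.toList brCut = -1
  · rw [if_pos h, if_pos h]
    simp
  · rw [if_neg h, if_neg h]
    have h0 : 0 ≤ PySem.Chars.find t.toList brCut := by
      have := PySem.Chars.neg_one_le_find (s := t.toList) (sub := brCut)
      omega
    rw [PySem.List.slice_from t.toList (by omega : (0 : Int) ≤ PySem.Chars.find t.toList brCut + 6)]
    congr 1
    omega

theorem lastPiece_one (l : List Char) : lastPiece 1 l [] = aStep l := by
  rw [show (1 : Nat) = 0 + 1 from rfl, lastPiece_step, aStep]
  by_cases h : PySem.Chars.find l brCut = -1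
  · simp [h]
  · simp [h, lastPiece]

theorem lastPiece_two (cs : List Char) : lastPiece 2 cs [] = aStep (aStep cs) := by
  rw [show (2 : Nat) = 1 + 1 from rfl, lastPiece_step]
  by_cases h : PySem.Chars.find cs brCut = -1
  · rw [if_pos h]
    simp [aStep, h]
  · rw [if_neg h, lastPiece_one,
        show aStep cs = List.drop ((PySem.Chars.find cs brCut).toNat + 6) cs from by
          rw [aStep, if_neg h]]

theorem main (s : String) : filtrar_descripcion s = filtrar_descripcion_alt s := by
  -- reduce A to aStep ∘ aStep on toList
  have hA : (filtrar_descripcion s).toList = aStep (aStep s.toList) := by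
    rw [filtrar_descripcion]
    rw [show PySem.List.pyRange 0 2 1 = [0, 1] from rfl]
    simp only [List.foldl]
    rw [stepA_toList, stepA_toList]
  -- reduce B
  have hsplit := PySem.Str.splitMax?_map s "<br />" 2
  have hch : PySem.Chars.splitMax? s.toList "<br />".toList 2
      = some (PySem.Chars.splitOnMax s.toList brCut 2) := by
    rw [PySem.Chars.splitMax?, if_neg (by decide)]
    rfl
  rw [hch] at hsplit
  cases hp : PySem.Str.splitMax? s "<br />" 2 with
  | none => rw [hp] at hsplit; simp at hsplit
  | some parts =>
    rw [hp] at hsplit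
    simp only [Option.map_some, Option.some.injEq] at hsplit
    have hlast : (PySem.Chars.splitOnMax s.toList brCut 2).getLast? = some (lastPiece 2 s.toList []) := by
      rw [PySem.Chars.splitOnMax, if_neg (by decide)]
      exact go_getLast? (s.toList.length + 1) 2 s.toList [] [] (by omega)
    rw [← hsplit] at hlast
    rw [List.getLast?_map] at hlast
    cases hq : parts.getLast? with
    | none => rw [hq] at hlast; simp at hlast
    | some lastStr =>
      rw [hq] at hlast
      simp only [Option.map_some, Option.some.injEq] at hlast
      have hne : parts ≠ [] := by
        intro h; rw [h] at hq; simp at hq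
      have hB : filtrar_descripcion_alt s = lastStr := by
        rw [filtrar_descripcion_alt, hp]
        show (PySem.List.pyGet? parts (-1)).getD "" = lastStr
        have h1 : parts.length ≥ 1 := by
          cases parts with
          | nil => exact absurd rfl hne
          | cons a t => simp
        rw [PySem.List.pyGet?_neg_ofNat parts 1 (by omega) (by omega)]
        rw [← List.getLast?_eq_getElem?, hq]
        rfl
      rw [hB]
      apply String.toList_inj.mp
      rw [hA, hlast, lastPiece_two]

-- ===== VERDICT (by name: the statement is the Claim_ definition above) =====
theorem filtrar_descripcion_spec : Claim_equal_filtrar_descripcion := by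
  intro s _
  exact main s
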